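-- pv_equiv track=rewrite | github.com/promptdriven/pdd | pdd/sync_order.py | get_affected_modules
-- ===== SOURCE A (Python) =====
-- from typing import Set, Optional, Dict, List, Tuple, Deque
-- from collections import deque, defaultdict
--
-- def get_affected_modules(sorted_modules: List[str], modified: Set[str], graph: Dict[str, List[str]], cyclic_modules: Optional[Set[str]] = None) -> List[str]:
--     """
--     Identifies modules that need syncing based on modified modules and dependencies.
--
--     Args:
--         sorted_modules: Full list of modules in topological order.
--         modified: Set of module names that have changed.
--         graph: Dependency graph (module -> dependencies).
--         cyclic_modules: Optional set of modules that are part of dependency cycles.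
--             These are excluded from sorted_modules by topological sort but should
--             still be included if they're affected.
--
--     Returns:
--         List of modules to sync, preserving topological order for non-cyclic modules,
--         with cyclic modules appended at the end in alphabetical order.
--     """
--     if not modified:
--         return []
--
--     # Build reverse graph: Dependency -> [Dependents]
--     # This allows us to traverse "up" the chain from a modified dependency to things that use it
--     reverse_graph: Dict[str, Set[str]] = defaultdict(set)
--     for node, deps in graph.items():
--         for dep in deps:
--             reverse_graph[dep].add(node)
--
--     affected = set()
--     queue = deque(modified)
--
--     # BFS to find all transitive dependents
--     while queue:
--         current = queue.popleft()
--         if current in affected: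
--             continue
--
--         affected.add(current)
--
--         # Add all modules that depend on current
--         for dependent in reverse_graph.get(current, []):
--             if dependent not in affected:
--                 queue.append(dependent)
--
--     # Filter sorted_modules to keep only affected ones, preserving order
--     result = [m for m in sorted_modules if m in affected]
--
--     # Include affected modules that are in cycles (append at end, sorted for determinism)
--     if cyclic_modules:
--         cyclic_affected = sorted([m for m in cyclic_modules if m in affected and m not in result])
--         result.extend(cyclic_affected)
--
--     return result
-- ===== SOURCE B (Python) =====
-- from typing import Set, Optional, Dict, List
--
-- def get_affected_modules(sorted_modules: List[str], modified: Set[str], graph: Dict[str, List[str]], cyclic_modules: Optional[Set[str]] = None) -> List[str]: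
--     """Round-based saturation over the forward graph: no reverse graph, no BFS queue.
--     Repeatedly add any module one of whose dependencies is already affected, until
--     a full pass over the graph adds nothing (a least fixpoint, = transitive dependents)."""
--     if not modified:
--         return []
--
--     affected = set(modified)
--     changed = True
--     while changed:
--         changed = False
--         for node, deps in graph.items():
--             if node not in affected and any(d in affected for d in deps):
--                 affected.add(node)
--                 changed = True
--
--     result = [m for m in sorted_modules if m in affected]
--     if cyclic_modules:
--         result.extend(sorted(m for m in cyclic_modules if m in affected and m not in result))
--     return result
-- ===== Notes on version B (the rewrite author's own statement) =====
-- stated objective: simpler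
-- what changed: Replaced A's reverse-graph construction plus BFS worklist queue by a round-based saturation: repeatedly sweep graph.items() adding any node with an already-affected dependency until a full pass adds nothing (same least fixpoint).
import Mathlib
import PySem

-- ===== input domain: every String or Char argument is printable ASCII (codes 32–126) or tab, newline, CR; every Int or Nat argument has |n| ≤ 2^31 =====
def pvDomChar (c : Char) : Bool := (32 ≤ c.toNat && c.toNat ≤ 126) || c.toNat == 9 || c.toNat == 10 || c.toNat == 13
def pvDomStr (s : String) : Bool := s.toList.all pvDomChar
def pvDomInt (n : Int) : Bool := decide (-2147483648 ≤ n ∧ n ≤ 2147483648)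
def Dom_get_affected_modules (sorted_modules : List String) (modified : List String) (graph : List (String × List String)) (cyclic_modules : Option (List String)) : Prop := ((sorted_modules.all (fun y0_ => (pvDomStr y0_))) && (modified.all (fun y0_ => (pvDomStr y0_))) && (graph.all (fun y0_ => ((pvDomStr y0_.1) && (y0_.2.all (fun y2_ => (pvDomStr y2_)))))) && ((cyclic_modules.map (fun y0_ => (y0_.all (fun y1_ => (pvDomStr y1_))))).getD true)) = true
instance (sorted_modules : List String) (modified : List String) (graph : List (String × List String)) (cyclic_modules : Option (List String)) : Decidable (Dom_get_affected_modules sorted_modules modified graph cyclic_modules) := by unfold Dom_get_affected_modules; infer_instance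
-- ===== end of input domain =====

-- B replaces A's reverse-graph + BFS queue by round-based saturation over the forward
-- graph (objective: simpler — no reverse index, no queue; same results).

-- ===== PORT A =====
-- A-side helper: the reverse graph (defaultdict(set): dependency -> set of dependents)
def pvRG (graph : List (String × List String)) : PySem.Dict String (PySem.Set String) :=
  graph.foldl
    (fun rg p => p.2.foldl (fun rg2 dep => rg2.modify dep [] (fun s => PySem.Set.add s p.1)) rg)
    PySem.Dict.empty

-- universe of node names, used only to justify termination of the BFS
def pvU (modified : List String) (graph : List (String × List String)) : List String :=
  modified ++ graph.map (·.1)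

-- port-needed lemma: every value of the reverse graph is a duplicate-free list of graph keys
theorem pvRG_inner_good (node : String) (P : String → Prop) (hnode : P node) :
    ∀ (deps : List String) (rg : PySem.Dict String (PySem.Set String)),
      (∀ c, ((rg.getD c []).Nodup ∧ ∀ d ∈ rg.getD c [], P d)) →
      ∀ c, (((deps.foldl (fun rg2 dep => rg2.modify dep [] (fun s => PySem.Set.add s node)) rg).getD c []).Nodup ∧
            ∀ d ∈ (deps.foldl (fun rg2 dep => rg2.modify dep [] (fun s => PySem.Set.add s node)) rg).getD c [], P d) := by
  intro deps
  induction deps with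
  | nil => intro rg h; exact h
  | cons dep rest ih =>
    intro rg h
    simp only [List.foldl_cons]
    apply ih
    intro c
    by_cases hc : c = dep
    · subst hc
      rw [PySem.Dict.getD_modify_self]
      refine ⟨PySem.Set.nodup_add _ _ (h c).1, ?_⟩
      intro d hd
      rcases (PySem.Set.mem_add _ _ _).1 hd with h' | rfl
      · exact (h c).2 d h'
      · exact hnode
    · rw [PySem.Dict.getD_modify_of_ne _ _ _ hc]
      exact h c

theorem pvRG_good (modified : List String) (graph : List (String × List String)) :
    ∀ c, (((pvRG graph).getD c []).Nodup ∧
          ∀ d ∈ (pvRG graph).getD c [], d ∈ pvU modified graph) := by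
  have key : ∀ (l : List (String × List String)) (rg : PySem.Dict String (PySem.Set String)),
      (∀ p ∈ l, p.1 ∈ pvU modified graph) →
      (∀ c, ((rg.getD c []).Nodup ∧ ∀ d ∈ rg.getD c [], d ∈ pvU modified graph)) →
      ∀ c, (((l.foldl (fun rg p => p.2.foldl (fun rg2 dep => rg2.modify dep [] (fun s => PySem.Set.add s p.1)) rg) rg).getD c []).Nodup ∧
            ∀ d ∈ (l.foldl (fun rg p => p.2.foldl (fun rg2 dep => rg2.modify dep [] (fun s => PySem.Set.add s p.1)) rg) rg).getD c [], d ∈ pvU modified graph) := by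
    intro l
    induction l with
    | nil => intro rg _ h; exact h
    | cons p t ih =>
      intro rg hl h
      simp only [List.foldl_cons]
      exact ih _ (fun q hq => hl q (List.mem_cons_of_mem _ hq))
        (pvRG_inner_good p.1 _ (hl p (List.mem_cons_self)) p.2 rg h)
  unfold pvRG
  apply key
  · intro p hp
    exact List.mem_append_right _ (List.mem_map_of_mem hp)
  · intro c
    constructor
    · simp [PySem.Dict.getD, PySem.Dict.get?, PySem.Dict.empty]
    · intro d hd
      simp [PySem.Dict.getD, PySem.Dict.get?, PySem.Dict.empty] at hd

-- port-needed lemma: removing one more satisfied element strictly shrinks a filtered list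
theorem pvFilter_len_lt {l : List String} {p q : String → Bool} (a : String)
    (ha : a ∈ l) (hpa : p a = true) (hqa : q a = false)
    (himp : ∀ x, q x = true → p x = true) :
    (l.filter q).length < (l.filter p).length := by
  have hle : ∀ (m : List String), (m.filter q).length ≤ (m.filter p).length := by
    intro m
    induction m with
    | nil => simp
    | cons b t ih =>
      by_cases hb : q b = true
      · simp [hb, himp b hb]; omega
      · simp only [Bool.not_eq_true] at hb
        by_cases hpb : p b = true
        · simp [hb, hpb]; omega
        · simp only [Bool.not_eq_true] at hpb; simp [hb, hpb]; omega
  induction l with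
  | nil => simp at ha
  | cons b t ih =>
    rcases List.mem_cons.1 ha with rfl | hat
    · simp [hpa, hqa]
      have := hle t; omega
    · have := ih hat
      by_cases hb : q b = true
      · simp [hb, himp b hb]; omega
      · simp only [Bool.not_eq_true] at hb
        by_cases hpb : p b = true
        · simp [hb, hpb]; omega
        · simp only [Bool.not_eq_true] at hpb; simp [hb, hpb]; omega

-- port-needed lemma: a duplicate-free list of elements of U is no longer than U.dedup
theorem pvNodup_len_le {l U : List String} (hn : l.Nodup) (hsub : ∀ x ∈ l, x ∈ U) :
    l.length ≤ U.dedup.length := by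
  have h1 : l.toFinset.card = l.length := List.toFinset_card_of_nodup hn
  have h2 : l.toFinset ⊆ U.toFinset := by
    intro a ha; simp only [List.mem_toFinset] at *; exact hsub a ha
  have h3 := Finset.card_le_card h2
  have h4 : U.toFinset.card = U.dedup.length := List.card_toFinset U
  omega

-- A's BFS loop ("while queue: …"); the two Prop arguments only justify termination
def pvBFS (rg : PySem.Dict String (PySem.Set String)) (U : List String)
    (hrg : ∀ c, ((rg.getD c []).Nodup ∧ ∀ d ∈ rg.getD c [], d ∈ U))
    (affected : PySem.Set String) (queue : List String)
    (hq : ∀ x ∈ queue, x ∈ U) : PySem.Set String :=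
  match queue, hq with
  | [], _ => affected
  | current :: rest, hq =>
    if hc : PySem.Set.contains affected current then
      pvBFS rg U hrg affected rest (fun x hx => hq x (List.mem_cons_of_mem _ hx))
    else
      pvBFS rg U hrg (PySem.Set.add affected current)
        (rest ++ (rg.getD current []).filter
          (fun d => !PySem.Set.contains (PySem.Set.add affected current) d))
        (fun x hx => by
          rcases List.mem_append.1 hx with h | h
          · exact hq x (List.mem_cons_of_mem _ h)
          · exact (hrg current).2 x (List.mem_of_mem_filter h))
termination_by
  (U.dedup.filter (fun x => !PySem.Set.contains affected x)).length * (U.dedup.length + 1)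
    + queue.length
decreasing_by
  · simp only [List.length_cons]; omega
  · have hcur : current ∈ U := hq current (List.mem_cons_self)
    have hcf : PySem.Set.contains affected current = false := by
      simpa using hc
    have hnm : current ∉ affected := fun hm => by
      rw [(PySem.Set.contains_iff _ _).2 hm] at hcf; cases hcf
    have hF : ((U.dedup.filter (fun x => !PySem.Set.contains (PySem.Set.add affected current) x)).length)
        < ((U.dedup.filter (fun x => !PySem.Set.contains affected x)).length) := by
      apply pvFilter_len_lt current (List.mem_dedup.2 hcur)
      · simpa using hnm
      · simp [PySem.Set.mem_add]
      · intro x hx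
        simp only [Bool.not_eq_true', Bool.not_eq_eq_eq_not, Bool.not_true,
          PySem.Set.contains_eq_listContains] at hx ⊢
        simp only [List.contains_eq_mem, decide_eq_false_iff_not] at hx ⊢
        exact fun hm => hx ((PySem.Set.mem_add _ _ _).2 (Or.inl hm))
    have happ : ((rg.getD current []).filter
        (fun d => !PySem.Set.contains (PySem.Set.add affected current) d)).length ≤ U.dedup.length := by
      apply pvNodup_len_le ((hrg current).1.filter _)
      intro x hx
      exact (hrg current).2 x (List.mem_of_mem_filter hx)
    simp only [List.length_append, List.length_cons]
    have hmul : ((U.dedup.filter (fun x => !PySem.Set.contains (PySem.Set.add affected current) x)).length + 1)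
        * (U.dedup.length + 1)
        ≤ ((U.dedup.filter (fun x => !PySem.Set.contains affected x)).length) * (U.dedup.length + 1) :=
      Nat.mul_le_mul_right _ hF
    rw [Nat.add_mul] at hmul
    omega

def get_affected_modules (sorted_modules : List String) (modified : List String) (graph : List (String × List String)) (cyclic_modules : Option (List String)) : List String :=
  if modified.isEmpty then []
  else
    let rg := pvRG graph
    let affected := pvBFS rg (pvU modified graph) (pvRG_good modified graph)
      PySem.Set.empty modified (fun x hx => List.mem_append_left _ hx)
    let result := sorted_modules.filter (fun m => PySem.Set.contains affected m)
    match cyclic_modules with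
    | none => result
    | some cyc =>
      if cyc.isEmpty then result
      else result ++ PySem.List.sorted
        (cyc.filter (fun m => PySem.Set.contains affected m && !result.contains m))
        (fun x => x) false

-- ===== PORT B =====
-- one full pass over graph.items(): grow the set, report whether anything was added
def pvRound (graph : List (String × List String)) (S : PySem.Set String) :
    PySem.Set String × Bool :=
  graph.foldl
    (fun acc p =>
      if !PySem.Set.contains acc.1 p.1 && p.2.any (fun d => PySem.Set.contains acc.1 d) then
        (PySem.Set.add acc.1 p.1, true)
      else acc)
    (S, false)

-- port-needed lemmas about one round, used to justify termination of pvSat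
theorem pvRound_aux_mono (l : List (String × List String)) :
    ∀ (acc : PySem.Set String × Bool) (x : String), x ∈ acc.1 →
      x ∈ (l.foldl (fun acc p =>
        if !PySem.Set.contains acc.1 p.1 && p.2.any (fun d => PySem.Set.contains acc.1 d) then
          (PySem.Set.add acc.1 p.1, true) else acc) acc).1 := by
  induction l with
  | nil => intro acc x hx; exact hx
  | cons p t ih =>
    intro acc x hx
    simp only [List.foldl_cons]
    split
    · exact ih _ x ((PySem.Set.mem_add _ _ _).2 (Or.inl hx))
    · exact ih _ x hx

theorem pvRound_aux_progress (l : List (String × List String)) :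
    ∀ (acc : PySem.Set String × Bool),
      (l.foldl (fun acc p =>
        if !PySem.Set.contains acc.1 p.1 && p.2.any (fun d => PySem.Set.contains acc.1 d) then
          (PySem.Set.add acc.1 p.1, true) else acc) acc).2 = true →
      acc.2 = true ∨ ∃ k ∈ l.map (·.1), k ∉ acc.1 ∧
        k ∈ (l.foldl (fun acc p =>
          if !PySem.Set.contains acc.1 p.1 && p.2.any (fun d => PySem.Set.contains acc.1 d) then
            (PySem.Set.add acc.1 p.1, true) else acc) acc).1 := by
  induction l with
  | nil => intro acc h; exact Or.inl h
  | cons p t ih =>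
    intro acc h
    simp only [List.foldl_cons] at h ⊢
    by_cases hcond : (!PySem.Set.contains acc.1 p.1 && p.2.any (fun d => PySem.Set.contains acc.1 d)) = true
    · rw [if_pos hcond] at h ⊢
      refine Or.inr ⟨p.1, by simp, ?_, ?_⟩
      · intro hm
        have h2 := hcond
        rw [Bool.and_eq_true] at h2
        rw [(PySem.Set.contains_iff _ _).2 hm] at h2
        simp at h2
      · exact pvRound_aux_mono t _ p.1 ((PySem.Set.mem_add _ _ _).2 (Or.inr rfl))
    · rw [if_neg hcond] at h ⊢
      rcases ih _ h with h' | ⟨k, hk1, hk2, hk3⟩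
      · exact Or.inl h'
      · exact Or.inr ⟨k, by simp only [List.map_cons, List.mem_cons]; exact Or.inr hk1, hk2, hk3⟩

theorem pvRound_mono (graph : List (String × List String)) (S : PySem.Set String) :
    ∀ x, PySem.Set.contains S x = true → PySem.Set.contains (pvRound graph S).1 x = true := by
  intro x hx
  exact (PySem.Set.contains_iff _ _).2
    (pvRound_aux_mono graph (S, false) x ((PySem.Set.contains_iff _ _).1 hx))

theorem pvRound_progress (graph : List (String × List String)) (S : PySem.Set String)
    (h : (pvRound graph S).2 = true) :
    ∃ k ∈ graph.map (·.1), PySem.Set.contains S k = false ∧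
      PySem.Set.contains (pvRound graph S).1 k = true := by
  rcases pvRound_aux_progress graph (S, false) h with h' | ⟨k, hk1, hk2, hk3⟩
  · cases h'
  · refine ⟨k, hk1, ?_, (PySem.Set.contains_iff _ _).2 hk3⟩
    cases hc : PySem.Set.contains S k
    · rfl
    · exact absurd ((PySem.Set.contains_iff _ _).1 hc) hk2

-- B's "while changed" loop
def pvSat (graph : List (String × List String)) (S : PySem.Set String) : PySem.Set String :=
  let r := pvRound graph S
  if h : r.2 then pvSat graph r.1 else r.1
termination_by
  ((graph.map (·.1)).dedup.filter (fun k => !PySem.Set.contains S k)).length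
decreasing_by
  rcases pvRound_progress graph S h with ⟨k, hk1, hk2, hk3⟩
  apply pvFilter_len_lt k (List.mem_dedup.2 hk1)
  · simp only [Bool.not_eq_true']
    simpa using fun hm => by rw [(PySem.Set.contains_iff _ _).2 hm] at hk2; cases hk2
  · simpa using (PySem.Set.contains_iff _ _).1 hk3
  · intro x hx
    simp only [Bool.not_eq_eq_eq_not, Bool.not_true] at hx ⊢
    cases hc : PySem.Set.contains S x
    · rfl
    · rw [pvRound_mono graph S x hc] at hx; cases hx

def get_affected_modules_alt (sorted_modules : List String) (modified : List String) (graph : List (String × List String)) (cyclic_modules : Option (List String)) : List String :=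
  if modified.isEmpty then []
  else
    let affected := pvSat graph (PySem.Set.ofList modified)
    let result := sorted_modules.filter (fun m => PySem.Set.contains affected m)
    match cyclic_modules with
    | none => result
    | some cyc =>
      if cyc.isEmpty then result
      else result ++ PySem.List.sorted
        (cyc.filter (fun m => PySem.Set.contains affected m && !result.contains m))
        (fun x => x) false

-- ===== PRECONDITION & SPEC =====
def Spec_get_affected_modules (sorted_modules : List String) (modified : List String) (graph : List (String × List String)) (cyclic_modules : Option (List String)) (out : List String) : Prop := out = get_affected_modules_alt sorted_modules modified graph cyclic_modules
instance (sorted_modules : List String) (modified : List String) (graph : List (String × List String)) (cyclic_modules : Option (List String)) (out : List String) : Decidable (Spec_get_affected_modules sorted_modules modified graph cyclic_modules out) := by unfold Spec_get_affected_modules; infer_instance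

-- ===== CLAIM (what is proved, stated in full; the proofs are below) =====
def Claim_equal_get_affected_modules : Prop := ∀ (sorted_modules : List String) (modified : List String) (graph : List (String × List String)) (cyclic_modules : Option (List String)), Dom_get_affected_modules sorted_modules modified graph cyclic_modules → Spec_get_affected_modules sorted_modules modified graph cyclic_modules (get_affected_modules sorted_modules modified graph cyclic_modules)

-- ===== LEMMAS AND PROOFS =====

-- membership in the reverse graph: x ∈ rg[c] iff some graph item (x, deps) has c ∈ deps
theorem mem_pvRG_inner (node : String) :
    ∀ (deps : List String) (rg : PySem.Dict String (PySem.Set String)) (c x : String),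
      x ∈ (deps.foldl (fun rg2 dep => rg2.modify dep [] (fun s => PySem.Set.add s node)) rg).getD c [] ↔
      (x ∈ rg.getD c [] ∨ (x = node ∧ c ∈ deps)) := by
  intro deps
  induction deps with
  | nil => intro rg c x; simp
  | cons dep rest ih =>
    intro rg c x
    simp only [List.foldl_cons]
    rw [ih]
    by_cases hc : c = dep
    · subst hc
      rw [PySem.Dict.getD_modify_self, PySem.Set.mem_add]
      simp only [List.mem_cons]
      tauto
    · rw [PySem.Dict.getD_modify_of_ne _ _ _ hc]
      simp only [List.mem_cons]
      tauto

theorem mem_pvRG (graph : List (String × List String)) (c x : String) :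
    x ∈ (pvRG graph).getD c [] ↔ ∃ p ∈ graph, x = p.1 ∧ c ∈ p.2 := by
  have key : ∀ (l : List (String × List String)) (rg : PySem.Dict String (PySem.Set String)),
      x ∈ (l.foldl (fun rg p => p.2.foldl (fun rg2 dep => rg2.modify dep [] (fun s => PySem.Set.add s p.1)) rg) rg).getD c [] ↔
      (x ∈ rg.getD c [] ∨ ∃ p ∈ l, x = p.1 ∧ c ∈ p.2) := by
    intro l
    induction l with
    | nil => simp
    | cons p t ih =>
      intro rg
      simp only [List.foldl_cons]
      rw [ih, mem_pvRG_inner]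
      simp only [List.mem_cons]
      constructor
      · rintro ((hm | ⟨rfl, hc⟩) | ⟨q, hq, rfl, hc⟩)
        · exact Or.inl hm
        · exact Or.inr ⟨p, Or.inl rfl, rfl, hc⟩
        · exact Or.inr ⟨q, Or.inr hq, rfl, hc⟩
      · rintro (hm | ⟨q, (rfl | hq), rfl, hc⟩)
        · exact Or.inl (Or.inl hm)
        · exact Or.inl (Or.inr ⟨rfl, hc⟩)
        · exact Or.inr ⟨q, hq, rfl, hc⟩
  unfold pvRG
  rw [key]
  simp [PySem.Dict.getD, PySem.Dict.get?, PySem.Dict.empty]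

-- BFS results contain the initial affected set and everything ever queued
theorem pvBFS_superset (rg : PySem.Dict String (PySem.Set String)) (U : List String)
    (hrg : ∀ c, ((rg.getD c []).Nodup ∧ ∀ d ∈ rg.getD c [], d ∈ U))
    (affected : PySem.Set String) (queue : List String) (hq : ∀ x ∈ queue, x ∈ U) :
    ∀ x, (x ∈ affected ∨ x ∈ queue) → x ∈ pvBFS rg U hrg affected queue hq := by
  induction affected, queue, hq using pvBFS.induct rg U hrg with
  | case1 affected h1 h2 =>
    intro x hx
    rw [pvBFS]
    rcases hx with hx | hx
    · exact hx
    · simp at hx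
  | case2 affected current rest hq hc _ ih =>
    intro x hx
    rw [pvBFS]
    simp only [hc, dite_true]
    apply ih
    rcases hx with hx | hx
    · exact Or.inl hx
    · rcases List.mem_cons.1 hx with rfl | hx
      · exact Or.inl ((PySem.Set.contains_iff _ _).1 hc)
      · exact Or.inr hx
  | case3 affected current rest hq hc _ ih =>
    intro x hx
    rw [pvBFS]
    simp only [hc, dite_false]
    apply ih
    rcases hx with hx | hx
    · exact Or.inl ((PySem.Set.mem_add _ _ _).2 (Or.inl hx))
    · rcases List.mem_cons.1 hx with rfl | hx
      · exact Or.inl ((PySem.Set.mem_add _ _ _).2 (Or.inr rfl))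
      · exact Or.inr (List.mem_append_left _ hx)

-- BFS results lie inside any rg-closed set containing the start
theorem pvBFS_least (rg : PySem.Dict String (PySem.Set String)) (U : List String)
    (hrg : ∀ c, ((rg.getD c []).Nodup ∧ ∀ d ∈ rg.getD c [], d ∈ U))
    (affected : PySem.Set String) (queue : List String) (hq : ∀ x ∈ queue, x ∈ U)
    (T : List String) (hT : ∀ c ∈ T, ∀ d ∈ rg.getD c [], d ∈ T)
    (ha : ∀ x ∈ affected, x ∈ T) (hqT : ∀ x ∈ queue, x ∈ T) :
    ∀ x ∈ pvBFS rg U hrg affected queue hq, x ∈ T := by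
  induction affected, queue, hq using pvBFS.induct rg U hrg with
  | case1 affected h1 h2 =>
    rw [pvBFS]; exact ha
  | case2 affected current rest hq hc _ ih =>
    rw [pvBFS]
    simp only [hc, dite_true]
    exact ih ha (fun x hx => hqT x (List.mem_cons_of_mem _ hx))
  | case3 affected current rest hq hc _ ih =>
    rw [pvBFS]
    simp only [hc, dite_false]
    apply ih
    · intro x hx
      rcases (PySem.Set.mem_add _ _ _).1 hx with hx | rfl
      · exact ha x hx
      · exact hqT x List.mem_cons_self
    · intro x hx
      rcases List.mem_append.1 hx with hx | hx
      · exact hqT x (List.mem_cons_of_mem _ hx)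
      · exact hT current (hqT current List.mem_cons_self) x (List.mem_of_mem_filter hx)

-- BFS results are rg-closed
theorem pvBFS_closed (rg : PySem.Dict String (PySem.Set String)) (U : List String)
    (hrg : ∀ c, ((rg.getD c []).Nodup ∧ ∀ d ∈ rg.getD c [], d ∈ U))
    (affected : PySem.Set String) (queue : List String) (hq : ∀ x ∈ queue, x ∈ U)
    (hinv : ∀ x ∈ affected, ∀ d ∈ rg.getD x [], d ∈ affected ∨ d ∈ queue) :
    ∀ x ∈ pvBFS rg U hrg affected queue hq, ∀ d ∈ rg.getD x [],
      d ∈ pvBFS rg U hrg affected queue hq := by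
  induction affected, queue, hq using pvBFS.induct rg U hrg with
  | case1 affected h1 h2 =>
    rw [pvBFS]
    intro x hx d hd
    rcases hinv x hx d hd with h | h
    · exact h
    · simp at h
  | case2 affected current rest hq hc _ ih =>
    rw [pvBFS]
    simp only [hc, dite_true]
    apply ih
    intro x hx d hd
    rcases hinv x hx d hd with h | h
    · exact Or.inl h
    · rcases List.mem_cons.1 h with rfl | h
      · exact Or.inl ((PySem.Set.contains_iff _ _).1 hc)
      · exact Or.inr h
  | case3 affected current rest hq hc _ ih =>
    rw [pvBFS]
    simp only [hc, dite_false]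
    apply ih
    intro x hx d hd
    rcases (PySem.Set.mem_add _ _ _).1 hx with hx | rfl
    · rcases hinv x hx d hd with h | h
      · exact Or.inl ((PySem.Set.mem_add _ _ _).2 (Or.inl h))
      · rcases List.mem_cons.1 h with rfl | h
        · exact Or.inl ((PySem.Set.mem_add _ _ _).2 (Or.inr rfl))
        · exact Or.inr (List.mem_append_left _ h)
    · by_cases hda : d ∈ PySem.Set.add affected x
      · exact Or.inl hda
      · refine Or.inr (List.mem_append_right _ (List.mem_filter.2 ⟨hd, ?_⟩))
        simp only [Bool.not_eq_eq_eq_not, Bool.not_true, ← Bool.not_eq_true]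
        exact fun hcd => hda ((PySem.Set.contains_iff _ _).1 hcd)

-- the flag of a round pass never goes back from true to false
theorem pvRound_aux_flag (l : List (String × List String)) :
    ∀ (acc : PySem.Set String × Bool), acc.2 = true →
      (l.foldl (fun acc p =>
        if !PySem.Set.contains acc.1 p.1 && p.2.any (fun d => PySem.Set.contains acc.1 d) then
          (PySem.Set.add acc.1 p.1, true) else acc) acc).2 = true := by
  induction l with
  | nil => intro acc h; exact h
  | cons p t ih =>
    intro acc h
    simp only [List.foldl_cons]
    split
    · exact ih _ rfl
    · exact ih _ h

-- a round that reports no change changed nothing and found nothing to fire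
theorem pvRound_stable (graph : List (String × List String)) (S : PySem.Set String)
    (h : (pvRound graph S).2 = false) :
    (pvRound graph S).1 = S ∧
      ∀ p ∈ graph, PySem.Set.contains S p.1 = false →
        p.2.any (fun d => PySem.Set.contains S d) = false := by
  have key : ∀ (l : List (String × List String)) (acc : PySem.Set String × Bool),
      (l.foldl (fun acc p =>
        if !PySem.Set.contains acc.1 p.1 && p.2.any (fun d => PySem.Set.contains acc.1 d) then
          (PySem.Set.add acc.1 p.1, true) else acc) acc).2 = false →
      (l.foldl (fun acc p =>
        if !PySem.Set.contains acc.1 p.1 && p.2.any (fun d => PySem.Set.contains acc.1 d) then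
          (PySem.Set.add acc.1 p.1, true) else acc) acc).1 = acc.1 ∧
      ∀ p ∈ l, PySem.Set.contains acc.1 p.1 = false →
        p.2.any (fun d => PySem.Set.contains acc.1 d) = false := by
    intro l
    induction l with
    | nil => intro acc _; exact ⟨rfl, by simp⟩
    | cons p t ih =>
      intro acc h
      simp only [List.foldl_cons] at h ⊢
      by_cases hcond : (!PySem.Set.contains acc.1 p.1 && p.2.any (fun d => PySem.Set.contains acc.1 d)) = true
      · rw [if_pos hcond] at h
        rw [pvRound_aux_flag t _ rfl] at h
        cases h
      · rw [if_neg hcond] at h ⊢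
        rcases ih _ h with ⟨h1, h2⟩
        refine ⟨h1, ?_⟩
        intro q hq hcq
        rcases List.mem_cons.1 hq with rfl | hq
        · rw [Bool.and_eq_true] at hcond
          push_neg at hcond
          by_cases ha : q.2.any (fun d => PySem.Set.contains acc.1 d) = true
          · exact absurd ha (hcond (by rw [hcq]; rfl))
          · simpa using ha
        · exact h2 q hq hcq
  exact key graph (S, false) h

-- saturation grows the set
theorem pvSat_superset (graph : List (String × List String)) (S : PySem.Set String) :
    ∀ x ∈ S, x ∈ pvSat graph S := by
  induction S using pvSat.induct graph with
  | case1 S r h ih =>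
    intro x hx
    rw [pvSat, dif_pos h]
    exact ih x (pvRound_aux_mono graph (S, false) x hx)
  | case2 S r h =>
    intro x hx
    rw [pvSat, dif_neg h]
    exact pvRound_aux_mono graph (S, false) x hx

-- saturation stays inside any forward-closed superset
theorem pvSat_least (graph : List (String × List String)) (S : PySem.Set String)
    (T : List String) (hT : ∀ p ∈ graph, (∃ d ∈ p.2, d ∈ T) → p.1 ∈ T)
    (hS : ∀ x ∈ S, x ∈ T) : ∀ x ∈ pvSat graph S, x ∈ T := by
  have round_le : ∀ (l : List (String × List String)), (∀ p ∈ l, (∃ d ∈ p.2, d ∈ T) → p.1 ∈ T) →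
      ∀ (acc : PySem.Set String × Bool), (∀ x ∈ acc.1, x ∈ T) →
      ∀ x ∈ (l.foldl (fun acc p =>
        if !PySem.Set.contains acc.1 p.1 && p.2.any (fun d => PySem.Set.contains acc.1 d) then
          (PySem.Set.add acc.1 p.1, true) else acc) acc).1, x ∈ T := by
    intro l hl
    induction l with
    | nil => intro acc hacc; exact hacc
    | cons p t ih =>
      intro acc hacc
      simp only [List.foldl_cons]
      by_cases hcond : (!PySem.Set.contains acc.1 p.1 && p.2.any (fun d => PySem.Set.contains acc.1 d)) = true
      · rw [if_pos hcond]
        apply ih (fun q hq => hl q (List.mem_cons_of_mem _ hq))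
        intro x hx
        rcases (PySem.Set.mem_add _ _ _).1 hx with hx | rfl
        · exact hacc x hx
        · rw [Bool.and_eq_true] at hcond
          rcases List.any_eq_true.1 hcond.2 with ⟨d, hd, hcd⟩
          exact hl p List.mem_cons_self ⟨d, hd, hacc d ((PySem.Set.contains_iff _ _).1 hcd)⟩
      · rw [if_neg hcond]
        exact ih (fun q hq => hl q (List.mem_cons_of_mem _ hq)) acc hacc
  revert hS
  induction S using pvSat.induct graph with
  | case1 S r h ih =>
    intro hS
    rw [pvSat, dif_pos h]
    exact ih (round_le graph hT (S, false) hS)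
  | case2 S r h =>
    intro hS
    rw [pvSat, dif_neg h]
    exact round_le graph hT (S, false) hS

-- the saturation result is forward-closed
theorem pvSat_closed (graph : List (String × List String)) (S : PySem.Set String) :
    ∀ p ∈ graph, (∃ d ∈ p.2, d ∈ pvSat graph S) → p.1 ∈ pvSat graph S := by
  induction S using pvSat.induct graph with
  | case1 S r h ih =>
    rw [pvSat, dif_pos h]
    exact ih
  | case2 S r h =>
    rw [pvSat, dif_neg h]
    intro p hp ⟨d, hd, hdS⟩
    have hst := pvRound_stable graph S (by simpa using h)
    rw [hst.1] at hdS ⊢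
    by_cases hcp : PySem.Set.contains S p.1 = true
    · exact (PySem.Set.contains_iff _ _).1 hcp
    · exfalso
      have hany := hst.2 p hp (by simpa using hcp)
      have htrue : p.2.any (fun d => PySem.Set.contains S d) = true :=
        List.any_eq_true.2 ⟨d, hd, (PySem.Set.contains_iff _ _).2 hdS⟩
      rw [hany] at htrue
      cases htrue

-- the two affected sets have the same members
theorem affected_eq (modified : List String) (graph : List (String × List String)) :
    ∀ x, (x ∈ pvBFS (pvRG graph) (pvU modified graph) (pvRG_good modified graph)
            PySem.Set.empty modified (fun x hx => List.mem_append_left _ hx)) ↔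
         x ∈ pvSat graph (PySem.Set.ofList modified) := by
  intro x
  constructor
  · intro hx
    refine pvBFS_least _ _ _ _ _ _ (pvSat graph (PySem.Set.ofList modified)) ?_ (by simp [PySem.Set.empty]) ?_ x hx
    · intro c hc d hd
      rcases (mem_pvRG graph c d).1 hd with ⟨p, hp, rfl, hcp⟩
      exact pvSat_closed graph _ p hp ⟨c, hcp, hc⟩
    · intro y hy
      exact pvSat_superset graph _ y ((PySem.Set.mem_ofList _ _).2 hy)
  · intro hx
    refine pvSat_least graph _ _ ?_ ?_ x hx
    · intro p hp hex
      rcases hex with ⟨d, hd, hdA⟩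
      have hrgmem : p.1 ∈ (pvRG graph).getD d [] := (mem_pvRG graph d p.1).2 ⟨p, hp, rfl, hd⟩
      exact pvBFS_closed _ _ _ _ _ _ (by intro y hy; simp [PySem.Set.empty] at hy) d hdA p.1 hrgmem
    · intro y hy
      exact pvBFS_superset _ _ _ _ _ _ y (Or.inr ((PySem.Set.mem_ofList _ _).1 hy))

-- ===== VERDICT (by name: the statement is the Claim_ definition above) =====
theorem get_affected_modules_spec : Claim_equal_get_affected_modules := by
  unfold Claim_equal_get_affected_modules
  intro sorted_modules modified graph cyclic_modules _
  unfold Spec_get_affected_modules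
  unfold get_affected_modules get_affected_modules_alt
  by_cases hm : modified.isEmpty
  · simp [hm]
  · have hcont : ∀ m, PySem.Set.contains (pvBFS (pvRG graph) (pvU modified graph)
        (pvRG_good modified graph) PySem.Set.empty modified
        (fun x hx => List.mem_append_left _ hx)) m
        = PySem.Set.contains (pvSat graph (PySem.Set.ofList modified)) m := by
      intro m
      have hiff := affected_eq modified graph m
      cases hA : PySem.Set.contains (pvBFS (pvRG graph) (pvU modified graph)
        (pvRG_good modified graph) PySem.Set.empty modified
        (fun x hx => List.mem_append_left _ hx)) m
      · cases hB : PySem.Set.contains (pvSat graph (PySem.Set.ofList modified)) m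
        · rfl
        · rw [← hA]
          exact ((PySem.Set.contains_iff _ _).2 (hiff.2 ((PySem.Set.contains_iff _ _).1 hB))).symm ▸ rfl
      · exact ((PySem.Set.contains_iff _ _).2 (hiff.1 ((PySem.Set.contains_iff _ _).1 hA))).symm

    rw [if_neg hm, if_neg hm]
    simp only [hcont]
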